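-- pv_equiv track=rewrite | github.com/roycrippen4/euler | p023.py | divisor_sum_list
-- ===== SOURCE A (Python) =====
-- def divisor_sum_list(limit):
--     xs = [0] * limit
--     for i in range(1, int(limit / 2) + 1):
--         j = 2 * i
--         while j < limit:
--             xs[j] += i
--             j += i
--     return xs
-- ===== SOURCE B (Python) =====
-- def divisor_sum_list(limit):
--     xs = [0] * limit
--     d = 1
--     while d * d < limit:
--         if d > 1:
--             xs[d * d] += d
--         for k in range(d + 1, (limit - 1) // d + 1):
--             xs[d * k] += d + (k if d > 1 else 0)
--         d += 1
--     return xs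
-- ===== Notes on version B (the rewrite author's own statement) =====
-- stated objective: alternative
-- what changed: Replaces A's per-divisor stride sieve (every divisor i up to limit/2 walks through all its multiples adding i) by a factor-pair sieve: the outer loop runs only while d*d < limit and each unordered factor pair (d, k) is visited exactly once, adding both cofactors at index d*k in one step (with the square d*d and the cofactor-is-n cases handled separately), so each divisor incidence is enumerated once per pair instead of once per divisor.
import Mathlib
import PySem

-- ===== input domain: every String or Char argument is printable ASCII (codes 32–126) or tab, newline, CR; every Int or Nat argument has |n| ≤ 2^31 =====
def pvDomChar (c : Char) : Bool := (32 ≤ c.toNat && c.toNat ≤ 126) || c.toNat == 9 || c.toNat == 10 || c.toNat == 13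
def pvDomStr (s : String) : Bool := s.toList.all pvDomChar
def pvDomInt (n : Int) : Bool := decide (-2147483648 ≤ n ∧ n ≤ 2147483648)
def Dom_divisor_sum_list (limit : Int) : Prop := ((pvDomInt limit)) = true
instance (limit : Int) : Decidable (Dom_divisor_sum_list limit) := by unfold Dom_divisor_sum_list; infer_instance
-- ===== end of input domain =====

-- B replaces A's per-divisor stride sieve (each divisor i walks through all its multiples
-- below limit) by a factor-PAIR sieve: the outer loop runs only while d*d < limit and each
-- unordered factor pair (d, k) is visited once, adding both cofactors at index d*k at once;
-- the return values are proved equal for every limit (objective: alternative algorithm).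

-- ===== PORT A =====
-- the inner 'while j < limit: xs[j] += i; j += i' loop; the '0 < i' conjunct only makes the
-- recursion total (every call passes i ≥ 1, where Python's loop terminates the same way)
def pvInner (i limit : Int) (xs : List Int) (j : Int) : List Int :=
  if _h : j < limit ∧ 0 < i then
    pvInner i limit (PySem.List.pySetD xs j (PySem.List.pyGetD xs j 0 + i)) (j + i)
  else xs
termination_by (limit - j).toNat
decreasing_by
  have : (PySem.List.pySetD xs j (PySem.List.pyGetD xs j 0 + i)).length = xs.length :=
    PySem.List.length_pySetD _ _ _
  omega

-- xs = [0] * limit; for i in range(1, int(limit / 2) + 1): …  (int(limit / 2) = truncdiv)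
def divisor_sum_list (limit : Int) : List Int :=
  (PySem.List.pyRange 1 (PySem.Int.truncdiv limit 2 + 1) 1).foldl
    (fun xs i => pvInner i limit xs (2 * i))
    (List.replicate limit.toNat 0)

-- ===== PORT B =====
-- the outer 'while d * d < limit' loop; per round: 'if d > 1: xs[d*d] += d' and then
-- 'for k in range(d + 1, (limit - 1) // d + 1): xs[d*k] += d + (k if d > 1 else 0)'
def pvPairLoop (limit : Int) (xs : List Int) (d : Int) : List Int :=
  if _h : d * d < limit then
    pvPairLoop limit
      ((PySem.List.pyRange (d + 1) (PySem.Int.floordiv (limit - 1) d + 1) 1).foldl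
        (fun ys k => PySem.List.pySetD ys (d * k)
          (PySem.List.pyGetD ys (d * k) 0 + (d + if 1 < d then k else 0)))
        (if 1 < d then PySem.List.pySetD xs (d * d) (PySem.List.pyGetD xs (d * d) 0 + d)
         else xs))
      (d + 1)
  else xs
termination_by (limit - d).toNat
decreasing_by
  have h1 : 0 ≤ (d - 1) * (d - 1) := mul_self_nonneg _
  have h2 : d * d - 2 * d + 1 = (d - 1) * (d - 1) := by ring
  have h3 : 0 ≤ d * d := mul_self_nonneg _
  omega

-- xs = [0] * limit; d = 1; <while loop>; return xs
def divisor_sum_list_alt (limit : Int) : List Int :=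
  pvPairLoop limit (List.replicate limit.toNat 0) 1

-- ===== PRECONDITION & SPEC =====
def Spec_divisor_sum_list (limit : Int) (out : List Int) : Prop := out = divisor_sum_list_alt limit
instance (limit : Int) (out : List Int) : Decidable (Spec_divisor_sum_list limit out) := by unfold Spec_divisor_sum_list; infer_instance

-- ===== CLAIM (what is proved, stated in full; the proofs are below) =====
def Claim_equal_divisor_sum_list : Prop := ∀ (limit : Int), Dom_divisor_sum_list limit → Spec_divisor_sum_list limit (divisor_sum_list limit)

-- ===== LEMMAS AND PROOFS =====

theorem pvInner_length (i limit : Int) (xs : List Int) (j : Int) :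
    (pvInner i limit xs j).length = xs.length := by
  fun_induction pvInner with
  | case1 xs j h ih => rw [ih]; exact PySem.List.length_pySetD _ _ _
  | case2 => rfl

theorem pvInner_getD (i limit : Int) (hi : 0 < i) (xs : List Int) (j : Int) (n : Nat) :
    0 ≤ j → (xs.length : Int) = limit →
    (pvInner i limit xs j).getD n 0 =
      xs.getD n 0 +
        (if j ≤ (n : Int) ∧ (n : Int) < limit ∧ i ∣ ((n : Int) - j) then i else 0) := by
  fun_induction pvInner with
  | case1 xs j h ih =>
      intro hj hlen
      have hij : 0 ≤ j + i := by omega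
      have hlen' : ((PySem.List.pySetD xs j (PySem.List.pyGetD xs j 0 + i)).length : Int) = limit := by
        rw [PySem.List.length_pySetD]; exact hlen
      rw [ih hij hlen']
      have hset : PySem.List.pySetD xs j (PySem.List.pyGetD xs j 0 + i)
          = xs.set j.toNat (PySem.List.pyGetD xs j 0 + i) := PySem.List.pySetD_of_nonneg _ _ hj
      have hjlen : j < (xs.length : Int) := by omega
      have hjn : j.toNat < xs.length := by omega
      have hgd : PySem.List.pyGetD xs j 0 = xs.getD j.toNat 0 := by
        rw [PySem.List.pyGetD_eq_getElem _ _ hj hjlen]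
        exact (List.getD_eq_getElem xs 0 hjn).symm
      rw [hset, hgd]
      by_cases hc : n = j.toNat
      · subst hc
        have e1 : (xs.set j.toNat (xs.getD j.toNat 0 + i)).getD j.toNat 0
            = xs.getD j.toNat 0 + i := by
          simp [List.getD_eq_getElem?_getD, hjn]
        rw [e1]
        have c1 : ¬ (j + i ≤ (j.toNat : Int) ∧ (j.toNat : Int) < limit ∧ i ∣ ((j.toNat : Int) - (j + i))) := by
          rintro ⟨h1, -, -⟩; omega
        have c2 : j ≤ ((j.toNat : Int)) ∧ ((j.toNat : Int)) < limit ∧ i ∣ (((j.toNat : Int)) - j) := by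
          refine ⟨by omega, by omega, ?_⟩
          have h0 : ((j.toNat : Int)) - j = 0 := by omega
          rw [h0]
          exact dvd_zero i
        rw [if_neg c1, if_pos c2]
        ring
      · have e2 : (xs.set j.toNat (xs.getD j.toNat 0 + i)).getD n 0 = xs.getD n 0 := by
          simp [List.getD_eq_getElem?_getD, List.getElem?_set_ne (by omega : j.toNat ≠ n)]
        rw [e2]
        have hiff : (j + i ≤ (n : Int) ∧ (n : Int) < limit ∧ i ∣ ((n : Int) - (j + i)))
            ↔ (j ≤ (n : Int) ∧ (n : Int) < limit ∧ i ∣ ((n : Int) - j)) := by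
          constructor
          · rintro ⟨h1, h2, h3⟩
            refine ⟨by omega, h2, ?_⟩
            have : (n : Int) - j = ((n : Int) - (j + i)) + i := by ring
            rw [this]; exact dvd_add h3 (dvd_refl i)
          · rintro ⟨h1, h2, h3⟩
            have hne : (n : Int) ≠ j := by omega
            have hpos : 0 < (n : Int) - j := by omega
            have hle : i ≤ (n : Int) - j := Int.le_of_dvd hpos h3
            refine ⟨by omega, h2, ?_⟩
            have : (n : Int) - (j + i) = ((n : Int) - j) - i := by ring
            rw [this]; exact dvd_sub h3 (dvd_refl i)
        rw [if_congr hiff rfl rfl]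
  | case2 xs j h =>
      intro hj hlen
      have : ¬ (j ≤ (n : Int) ∧ (n : Int) < limit ∧ i ∣ ((n : Int) - j)) := by
        rintro ⟨h1, h2, -⟩; exact h ⟨by omega, hi⟩
      simp [this]

theorem pvOuter_getD (limit : Int) (is : List Int) (xs : List Int)
    (hpos : ∀ i ∈ is, 0 < i) (hlen : (xs.length : Int) = limit) (n : Nat) :
    ((is.foldl (fun xs i => pvInner i limit xs (2 * i)) xs).getD n 0) =
      xs.getD n 0 +
        ((is.filter (fun i =>
          decide (2 * i ≤ (n : Int) ∧ (n : Int) < limit ∧ i ∣ (n : Int)))).sum) := by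
  induction is generalizing xs with
  | nil => simp
  | cons i is ih =>
      have hi : 0 < i := hpos i (by simp)
      have hlen' : ((pvInner i limit xs (2 * i)).length : Int) = limit := by
        rw [pvInner_length]; exact hlen
      rw [List.foldl_cons, ih _ (fun x hx => hpos x (List.mem_cons_of_mem _ hx)) hlen']
      rw [pvInner_getD i limit hi xs (2 * i) n (by omega) hlen]
      have hdvd : (i ∣ ((n : Int) - 2 * i)) ↔ (i ∣ (n : Int)) := by
        constructor
        · intro hd
          have : (n : Int) = ((n : Int) - 2 * i) + 2 * i := by ring
          rw [this]; exact dvd_add hd ⟨2, by ring⟩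
        · intro hd
          exact dvd_sub hd ⟨2, by ring⟩
      by_cases hc : 2 * i ≤ (n : Int) ∧ (n : Int) < limit ∧ i ∣ (n : Int)
      · have hc' : 2 * i ≤ (n : Int) ∧ (n : Int) < limit ∧ i ∣ ((n : Int) - 2 * i) :=
          ⟨hc.1, hc.2.1, hdvd.mpr hc.2.2⟩
        rw [if_pos hc', List.filter_cons_of_pos (by simpa using hc), List.sum_cons]
        ring
      · have hc' : ¬ (2 * i ≤ (n : Int) ∧ (n : Int) < limit ∧ i ∣ ((n : Int) - 2 * i)) := by
          rintro ⟨h1, h2, h3⟩; exact hc ⟨h1, h2, hdvd.mp h3⟩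
        rw [if_neg hc', List.filter_cons_of_neg (by simpa using hc)]
        ring

theorem pvOuter_length (limit : Int) (is : List Int) (xs : List Int) :
    (is.foldl (fun xs i => pvInner i limit xs (2 * i)) xs).length = xs.length := by
  induction is generalizing xs with
  | nil => rfl
  | cons i is ih => rw [List.foldl_cons, ih, pvInner_length]

-- a single 'ys[t] += v' step, as seen at an arbitrary index n
theorem pvAddB_getD (t v : Int) (ht : 0 ≤ t) (ys : List Int) (n : Nat) :
    (PySem.List.pySetD ys t (PySem.List.pyGetD ys t 0 + v)).getD n 0 =
      ys.getD n 0 + (if (n : Int) = t ∧ (n : Int) < (ys.length : Int) then v else 0) := by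
  by_cases hr : t < (ys.length : Int)
  · have htn : t.toNat < ys.length := by omega
    have hset : PySem.List.pySetD ys t (PySem.List.pyGetD ys t 0 + v)
        = ys.set t.toNat (PySem.List.pyGetD ys t 0 + v) := PySem.List.pySetD_of_nonneg _ _ ht
    have hgd : PySem.List.pyGetD ys t 0 = ys.getD t.toNat 0 := by
      rw [PySem.List.pyGetD_eq_getElem _ _ ht hr]
      exact (List.getD_eq_getElem ys 0 htn).symm
    rw [hset, hgd]
    by_cases hc : n = t.toNat
    · have e1 : (ys.set t.toNat (ys.getD t.toNat 0 + v)).getD n 0 = ys.getD t.toNat 0 + v := by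
        rw [hc]
        simp [List.getD_eq_getElem?_getD, htn]
      rw [e1, if_pos ⟨by omega, by omega⟩, hc]
    · have e2 : (ys.set t.toNat (ys.getD t.toNat 0 + v)).getD n 0 = ys.getD n 0 := by
        simp [List.getD_eq_getElem?_getD, List.getElem?_set_ne (by omega : t.toNat ≠ n)]
      rw [e2, if_neg (by rintro ⟨h1, -⟩; omega)]
      ring
  · have hnone : PySem.List.pySet? ys t (PySem.List.pyGetD ys t 0 + v) = none := by
      rw [PySem.List.pySet?_eq_none_iff]
      intro hin
      unfold PySem.Raise.InRange at hin
      omega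
    have : PySem.List.pySetD ys t (PySem.List.pyGetD ys t 0 + v) = ys := by
      unfold PySem.List.pySetD
      rw [hnone]
      rfl
    rw [this, if_neg (by rintro ⟨h1, h2⟩; omega)]
    ring

theorem pvFoldSet_length (f : List Int → Int → Int) (g : List Int → Int → Int)
    (l : List Int) (xs : List Int) :
    (l.foldl (fun ys k => PySem.List.pySetD ys (f ys k) (g ys k)) xs).length = xs.length := by
  induction l generalizing xs with
  | nil => rfl
  | cons a l ih => rw [List.foldl_cons, ih, PySem.List.length_pySetD]

-- B's inner loop 'for k in range(d+1, c+1): ys[d*k] += d + (k if d > 1 else 0)',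
-- as seen at an arbitrary index n
theorem pvPairInner_getD (d m : Int) (hd : 1 ≤ d) (c : Nat) (xs : List Int) (n : Nat)
    (hlen : (xs.length : Int) = m) :
    ((PySem.List.pyRange (d + 1) ((c : Int) + 1) 1).foldl
        (fun ys k => PySem.List.pySetD ys (d * k)
          (PySem.List.pyGetD ys (d * k) 0 + (d + if 1 < d then k else 0))) xs).getD n 0 =
      xs.getD n 0 +
        (if d ∣ (n : Int) ∧ d + 1 ≤ (n : Int) / d ∧ (n : Int) / d ≤ (c : Int) ∧ (n : Int) < m
          then d + (if 1 < d then (n : Int) / d else 0) else 0) := by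
  induction c generalizing xs with
  | zero =>
      rw [PySem.List.pyRange_one_eq_nil (by omega)]
      rw [List.foldl_nil, if_neg, add_zero]
      rintro ⟨-, h2, h3, -⟩
      omega
  | succ c ih =>
      have hcast : ((c + 1 : Nat) : Int) = (c : Int) + 1 := by push_cast; ring
      rw [hcast]
      by_cases hcd : (c : Int) < d
      · rw [PySem.List.pyRange_one_eq_nil (by omega)]
        rw [List.foldl_nil, if_neg, add_zero]
        rintro ⟨-, h2, h3, -⟩
        omega
      · have hsplit : PySem.List.pyRange (d + 1) ((c : Int) + 1 + 1) 1
            = PySem.List.pyRange (d + 1) ((c : Int) + 1) 1 ++ [(c : Int) + 1] := by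
          have := PySem.List.pyRange_one_succ_right (a := d + 1) (b := (c : Int) + 1) (by omega)
          simpa using this
        rw [hsplit, List.foldl_append, List.foldl_cons, List.foldl_nil]
        rw [pvAddB_getD _ _ (by positivity) _ n]
        rw [ih xs hlen]
        have hlenf : (((PySem.List.pyRange (d + 1) ((c : Int) + 1) 1).foldl
            (fun ys k => PySem.List.pySetD ys (d * k)
              (PySem.List.pyGetD ys (d * k) 0 + (d + if 1 < d then k else 0))) xs).length : Int)
            = m := by
          rw [pvFoldSet_length]; exact hlen
        rw [hlenf]
        by_cases hnew : (n : Int) = d * ((c : Int) + 1) ∧ (n : Int) < m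
        · have hdvd : d ∣ (n : Int) := ⟨(c : Int) + 1, hnew.1⟩
          have hdivq : (n : Int) / d = (c : Int) + 1 := by
            rw [hnew.1]; exact Int.mul_ediv_cancel_left _ (by omega)
          have hold : ¬ (d ∣ (n : Int) ∧ d + 1 ≤ (n : Int) / d ∧ (n : Int) / d ≤ (c : Int)
              ∧ (n : Int) < m) := by
            rintro ⟨-, -, h3, -⟩; omega
          have hnewc : d ∣ (n : Int) ∧ d + 1 ≤ (n : Int) / d ∧ (n : Int) / d ≤ (c : Int) + 1
              ∧ (n : Int) < m := ⟨hdvd, by omega, by omega, hnew.2⟩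
          rw [if_neg hold, if_pos hnew, if_pos hnewc, hdivq]
          ring
        · have hiff : (d ∣ (n : Int) ∧ d + 1 ≤ (n : Int) / d ∧ (n : Int) / d ≤ (c : Int) + 1
              ∧ (n : Int) < m)
              ↔ (d ∣ (n : Int) ∧ d + 1 ≤ (n : Int) / d ∧ (n : Int) / d ≤ (c : Int)
              ∧ (n : Int) < m) := by
            constructor
            · rintro ⟨h1, h2, h3, h4⟩
              refine ⟨h1, h2, ?_, h4⟩
              by_cases he : (n : Int) / d = (c : Int) + 1
              · exfalso
                apply hnew
                refine ⟨?_, h4⟩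
                have := Int.ediv_mul_cancel h1
                rw [he] at this
                rw [mul_comm]
                omega
              · omega
            · rintro ⟨h1, h2, h3, h4⟩
              exact ⟨h1, h2, by omega, h4⟩
          rw [if_neg hnew, if_congr hiff rfl rfl]
          ring

-- the contribution of one outer-loop round with value e to the entry at N
def pvC (limit N e : Int) : Int :=
  (if N = e * e ∧ N < limit ∧ 1 < e then e else 0) +
  (if e ∣ N ∧ e + 1 ≤ N / e ∧ N / e ≤ (limit - 1) / e ∧ N < limit
    then e + (if 1 < e then N / e else 0) else 0)

-- B's outer loop, as seen at an arbitrary index n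
theorem pvPairLoop_getD (limit : Int) (xs : List Int) (d : Int) (n : Nat) :
    1 ≤ d → (xs.length : Int) = limit →
    (pvPairLoop limit xs d).getD n 0 =
      xs.getD n 0 +
        ((Finset.Icc d limit).filter (fun e => e * e < limit)).sum (pvC limit (n : Int)) := by
  fun_induction pvPairLoop with
  | case1 xs d h ih =>
      intro hd hlen
      simp only [dite_eq_ite] at ih ⊢
      have hdlim : d < limit := by nlinarith
      set xs₁ := (if 1 < d then PySem.List.pySetD xs (d * d) (PySem.List.pyGetD xs (d * d) 0 + d)
          else xs) with hxs₁
      have hlen₁ : ((xs₁.length : Int)) = limit := by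
        rw [hxs₁]
        by_cases h1 : 1 < d
        · rw [if_pos h1, PySem.List.length_pySetD]; exact hlen
        · rw [if_neg h1]; exact hlen
      have hfd : PySem.Int.floordiv (limit - 1) d = (limit - 1) / d :=
        PySem.Int.floordiv_eq_ediv_of_pos (by omega)
      have hKnn : 0 ≤ (limit - 1) / d := Int.ediv_nonneg (by omega) (by omega)
      have hcnat : (((limit - 1) / d).toNat : Int) = (limit - 1) / d := by omega
      have hinner := pvPairInner_getD d limit hd ((limit - 1) / d).toNat xs₁ n hlen₁
      rw [hcnat] at hinner
      have hlen₂ : (((PySem.List.pyRange (d + 1) ((limit - 1) / d + 1) 1).foldl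
          (fun ys k => PySem.List.pySetD ys (d * k)
            (PySem.List.pyGetD ys (d * k) 0 + (d + if 1 < d then k else 0))) xs₁).length : Int)
          = limit := by
        rw [pvFoldSet_length]; exact hlen₁
      rw [hfd] at ih ⊢
      rw [ih (by omega) hlen₂, hinner]
      -- the square step
      have hsq : xs₁.getD n 0 = xs.getD n 0
          + (if (n : Int) = d * d ∧ (n : Int) < limit ∧ 1 < d then d else 0) := by
        rw [hxs₁]
        by_cases h1 : 1 < d
        · rw [if_pos h1, pvAddB_getD _ _ (by positivity) _ n, hlen]
          by_cases hc : (n : Int) = d * d ∧ (n : Int) < limit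
          · rw [if_pos hc, if_pos ⟨hc.1, hc.2, h1⟩]
          · rw [if_neg hc, if_neg (by rintro ⟨a, b, -⟩; exact hc ⟨a, b⟩)]
        · rw [if_neg h1, if_neg (by rintro ⟨-, -, hx⟩; exact h1 hx)]
          ring
      rw [hsq]
      -- split off the e = d term of the sum
      have hins : Finset.Icc d limit = insert d (Finset.Icc (d + 1) limit) := by
        ext e
        simp only [Finset.mem_Icc, Finset.mem_insert]
        omega
      have hnotmem : d ∉ (Finset.Icc (d + 1) limit).filter (fun e => e * e < limit) := by
        simp only [Finset.mem_filter, Finset.mem_Icc]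
        omega
      rw [hins, Finset.filter_insert, if_pos h, Finset.sum_insert hnotmem]
      unfold pvC
      ring
  | case2 xs d h =>
      intro hd hlen
      have : (Finset.Icc d limit).filter (fun e => e * e < limit) = ∅ := by
        apply Finset.filter_eq_empty_iff.mpr
        intro e he
        rw [Finset.mem_Icc] at he
        intro h2
        nlinarith
      rw [this, Finset.sum_empty, add_zero]

-- the per-entry identity: the pair-sieve contributions at N sum to the proper-divisor sum of N
theorem pvPairing (limit N : Int) (hN0 : 0 ≤ N) (hN : N < limit) :
    ((Finset.Icc 1 limit).filter (fun e => e * e < limit)).sum (pvC limit N)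
      = ((Finset.Icc 1 (N / 2)).filter (fun d => d ∣ N)).sum id := by
  by_cases h2 : N < 2
  · -- both sides vanish for N = 0, 1
    have hL : ((Finset.Icc 1 limit).filter (fun e => e * e < limit)).sum (pvC limit N) = 0 := by
      apply Finset.sum_eq_zero
      intro e he
      rw [Finset.mem_filter, Finset.mem_Icc] at he
      obtain ⟨⟨he1, -⟩, -⟩ := he
      unfold pvC
      rw [if_neg, if_neg, add_zero]
      · rintro ⟨h1, hq, -, -⟩
        have := Int.ediv_le_self e hN0
        omega
      · rintro ⟨ha, -, hb⟩
        nlinarith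
    have hR : ((Finset.Icc 1 (N / 2)).filter (fun d => d ∣ N)).sum id = 0 := by
      apply Finset.sum_eq_zero
      intro d hd
      rw [Finset.mem_filter, Finset.mem_Icc] at hd
      omega
    rw [hL, hR]
  · have hNge : 2 ≤ N := by omega
    set P : Finset Int := (Finset.Icc 1 (N / 2)).filter (fun d => d ∣ N) with hP
    have hmemP : ∀ d : Int, d ∈ P ↔ (1 ≤ d ∧ d ≤ N / 2 ∧ d ∣ N) := by
      intro d
      rw [hP, Finset.mem_filter, Finset.mem_Icc]
      tauto
    -- every summand reduces to a limit-free form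
    have hcongr : ∀ e ∈ (Finset.Icc 1 limit).filter (fun e => e * e < limit),
        pvC limit N e = (if N = e * e ∧ 1 < e then e else 0)
          + (if e ∣ N ∧ e * e < N then e + (if 1 < e then N / e else 0) else 0) := by
      intro e he
      rw [Finset.mem_filter, Finset.mem_Icc] at he
      obtain ⟨⟨he1, -⟩, -⟩ := he
      unfold pvC
      congr 1
      · apply if_congr _ rfl rfl
        constructor
        · rintro ⟨a, -, c⟩; exact ⟨a, c⟩
        · rintro ⟨a, c⟩; exact ⟨a, hN, c⟩
      · apply if_congr _ rfl rfl
        constructor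
        · rintro ⟨h1, hq, -, -⟩
          refine ⟨h1, ?_⟩
          have := (Int.le_ediv_iff_mul_le (by omega : (0:Int) < e)).mp hq
          nlinarith
        · rintro ⟨h1, hlt⟩
          have h1' := h1
          obtain ⟨k, hk⟩ := h1'
          have hke : e < k := by nlinarith
          have hq : e + 1 ≤ N / e := by
            apply (Int.le_ediv_iff_mul_le (by omega : (0:Int) < e)).mpr
            nlinarith
          exact ⟨h1, hq, Int.ediv_le_ediv (by omega) (by omega), hN⟩
    rw [Finset.sum_congr rfl hcongr]
    rw [Finset.sum_add_distrib]
    -- name the three parts of P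
    have hsplit1 : P.sum id = (P.filter (fun d => d * d < N)).sum id
        + (P.filter (fun d => ¬ d * d < N)).sum id :=
      (Finset.sum_filter_add_sum_filter_not P _ id).symm
    have hsplit2 : (P.filter (fun d => ¬ d * d < N)).sum id
        = ((P.filter (fun d => ¬ d * d < N)).filter (fun d => d * d = N)).sum id
        + ((P.filter (fun d => ¬ d * d < N)).filter (fun d => ¬ d * d = N)).sum id :=
      (Finset.sum_filter_add_sum_filter_not _ _ id).symm
    -- the square term collects exactly the diagonal divisor
    have hD1 : ((Finset.Icc 1 limit).filter (fun e => e * e < limit)).filter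
          (fun e => N = e * e ∧ 1 < e)
        = (P.filter (fun d => ¬ d * d < N)).filter (fun d => d * d = N) := by
      ext e
      simp only [Finset.mem_filter, Finset.mem_Icc, hmemP]
      constructor
      · rintro ⟨⟨⟨h1, -⟩, -⟩, hsq, hgt⟩
        refine ⟨⟨⟨by omega, ?_, ⟨e, hsq⟩⟩, by omega⟩, hsq.symm⟩
        exact (Int.le_ediv_iff_mul_le (by omega : (0:Int) < 2)).mpr (by nlinarith)
      · rintro ⟨⟨⟨h1, h2, h3⟩, h4⟩, h5⟩
        have hgt : 1 < e := by
          by_contra hle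
          have : e = 1 := by omega
          rw [this] at h5
          omega
        have helim : e ≤ limit := by nlinarith
        exact ⟨⟨⟨h1, helim⟩, by omega⟩, h5.symm, hgt⟩
    -- the pair term over divisors below the square root
    have hD2 : ((Finset.Icc 1 limit).filter (fun e => e * e < limit)).filter
          (fun e => e ∣ N ∧ e * e < N)
        = P.filter (fun d => d * d < N) := by
      ext e
      simp only [Finset.mem_filter, Finset.mem_Icc, hmemP]
      constructor
      · rintro ⟨⟨⟨h1, -⟩, -⟩, hdvd, hlt⟩
        refine ⟨⟨h1, ?_, hdvd⟩, hlt⟩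
        obtain ⟨k, hk⟩ := hdvd
        have : e < k := by nlinarith
        exact (Int.le_ediv_iff_mul_le (by omega : (0:Int) < 2)).mpr (by nlinarith)
      · rintro ⟨⟨h1, h2, h3⟩, h4⟩
        have helim : e ≤ limit := by nlinarith
        exact ⟨⟨⟨h1, helim⟩, by omega⟩, h3, h4⟩
    -- rewrite both ite-sums as filtered sums
    have hsum1 : ((Finset.Icc 1 limit).filter (fun e => e * e < limit)).sum
          (fun e => if N = e * e ∧ 1 < e then e else 0)
        = ((P.filter (fun d => ¬ d * d < N)).filter (fun d => d * d = N)).sum id := by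
      rw [← hD1, ← Finset.sum_filter]
      rfl
    have hsum2 : ((Finset.Icc 1 limit).filter (fun e => e * e < limit)).sum
          (fun e => if e ∣ N ∧ e * e < N then e + (if 1 < e then N / e else 0) else 0)
        = (P.filter (fun d => d * d < N)).sum (fun e => e + (if 1 < e then N / e else 0)) := by
      rw [← hD2, ← Finset.sum_filter]
    rw [hsum1, hsum2]
    -- split the pair sum into the small-divisor part and its cofactors
    have hsum3 : (P.filter (fun d => d * d < N)).sum (fun e => e + (if 1 < e then N / e else 0))
        = (P.filter (fun d => d * d < N)).sum id
          + ((P.filter (fun d => d * d < N)).filter (fun e => 1 < e)).sum (fun e => N / e) := by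
      rw [Finset.sum_add_distrib]
      congr 1
      exact (Finset.sum_filter _ _).symm
    rw [hsum3]
    -- the cofactors biject with the divisors above the square root
    have hbij : ((P.filter (fun d => d * d < N)).filter (fun e => 1 < e)).sum (fun e => N / e)
        = ((P.filter (fun d => ¬ d * d < N)).filter (fun d => ¬ d * d = N)).sum id := by
      have hmemS : ∀ e : Int, e ∈ (P.filter (fun d => d * d < N)).filter (fun e => 1 < e)
          ↔ (2 ≤ e ∧ e ∣ N ∧ e * e < N) := by
        intro e
        simp only [Finset.mem_filter, hmemP]
        constructor
        · rintro ⟨⟨⟨-, -, h3⟩, h4⟩, h5⟩; exact ⟨by omega, h3, h4⟩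
        · rintro ⟨h1, h2, h3⟩
          obtain ⟨k, hk⟩ := h2
          have hke : e < k := by nlinarith
          refine ⟨⟨⟨by omega, ?_, ⟨k, hk⟩⟩, h3⟩, by omega⟩
          exact (Int.le_ediv_iff_mul_le (by omega : (0:Int) < 2)).mpr (by nlinarith)
      have hmemB : ∀ d : Int, d ∈ (P.filter (fun d => ¬ d * d < N)).filter (fun d => ¬ d * d = N)
          ↔ (1 ≤ d ∧ d ≤ N / 2 ∧ d ∣ N ∧ N < d * d) := by
        intro d
        simp only [Finset.mem_filter, hmemP]
        constructor
        · rintro ⟨⟨⟨h1, h2, h3⟩, h4⟩, h5⟩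
          refine ⟨h1, h2, h3, ?_⟩
          rcases lt_trichotomy (d * d) N with hx | hx | hx
          · exact absurd hx h4
          · exact absurd hx h5
          · exact hx
        · rintro ⟨h1, h2, h3, h4⟩
          exact ⟨⟨⟨h1, h2, h3⟩, by omega⟩, by omega⟩
      apply Finset.sum_nbij' (i := fun e => N / e) (j := fun d => N / d)
      · intro e he
        rw [hmemS] at he
        obtain ⟨h1, h2, h3⟩ := he
        obtain ⟨k, hk⟩ := h2
        have hke : N / e = k := by rw [hk]; exact Int.mul_ediv_cancel_left _ (by omega)
        have hek : e < k := by nlinarith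
        rw [hmemB, hke]
        refine ⟨by omega, ?_, ⟨e, by rw [hk]; ring⟩, by nlinarith⟩
        exact (Int.le_ediv_iff_mul_le (by omega : (0:Int) < 2)).mpr (by nlinarith)
      · intro d hd
        rw [hmemB] at hd
        obtain ⟨h1, h2, h3, h4⟩ := hd
        obtain ⟨k, hk⟩ := h3
        have hdk : N / d = k := by rw [hk]; exact Int.mul_ediv_cancel_left _ (by omega)
        have h2d : 2 * d ≤ N := by
          have := (Int.le_ediv_iff_mul_le (by omega : (0:Int) < 2)).mp h2
          omega
        have hk2 : 2 ≤ k := by nlinarith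
        have hkd : k < d := by nlinarith
        rw [hmemS, hdk]
        exact ⟨hk2, ⟨d, by rw [hk]; ring⟩, by nlinarith⟩
      · intro e he
        rw [hmemS] at he
        obtain ⟨h1, h2, h3⟩ := he
        obtain ⟨k, hk⟩ := h2
        have hke : N / e = k := by rw [hk]; exact Int.mul_ediv_cancel_left _ (by omega)
        have hk1 : 1 ≤ k := by nlinarith
        rw [hke, hk, mul_comm]
        exact Int.mul_ediv_cancel_left _ (by omega)
      · intro d hd
        rw [hmemB] at hd
        obtain ⟨h1, h2, h3, h4⟩ := hd
        obtain ⟨k, hk⟩ := h3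
        have hdk : N / d = k := by rw [hk]; exact Int.mul_ediv_cancel_left _ (by omega)
        have hk1 : 1 ≤ k := by nlinarith
        rw [hdk, hk, mul_comm]
        exact Int.mul_ediv_cancel_left _ (by omega)
      · intro e he
        rfl
    rw [hbij, hsplit1, hsplit2]
    ring

-- A's per-entry value as a sum over the proper divisors of n
theorem pvIndexA_eq (limit : Int) (n : Nat) (hn : (n : Int) < limit) :
    ((PySem.List.pyRange 1 (PySem.Int.truncdiv limit 2 + 1) 1).filter (fun i =>
        decide (2 * i ≤ (n : Int) ∧ (n : Int) < limit ∧ i ∣ (n : Int)))).sum =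
      ((Finset.Icc 1 ((n : Int) / 2)).filter (fun d => d ∣ (n : Int))).sum id := by
  have hlim : 0 < limit := by omega
  have htd : PySem.Int.truncdiv limit 2 = limit / 2 := by
    show Int.tdiv limit 2 = limit / 2
    exact Int.tdiv_eq_ediv_of_nonneg (by omega)
  set N : Int := (n : Int) with hNdef
  have hN0 : 0 ≤ N := by positivity
  set lA := (PySem.List.pyRange 1 (PySem.Int.truncdiv limit 2 + 1) 1).filter (fun i =>
      decide (2 * i ≤ N ∧ N < limit ∧ i ∣ N)) with hlA
  have ndA : lA.Nodup := (PySem.List.nodup_pyRange_one _ _).filter _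
  have hmemA : ∀ d : Int, d ∈ lA ↔ (1 ≤ d ∧ 2 * d ≤ N ∧ d ∣ N) := by
    intro d
    rw [hlA, List.mem_filter, PySem.List.mem_pyRange_one, htd, decide_eq_true_eq]
    constructor
    · rintro ⟨⟨h1, -⟩, h2, -, h3⟩; exact ⟨h1, h2, h3⟩
    · rintro ⟨h1, h2, h3⟩
      have : d ≤ limit / 2 := (Int.le_ediv_iff_mul_le (by omega)).mpr (by omega)
      exact ⟨⟨h1, by omega⟩, h2, hn, h3⟩
  have hfin : lA.toFinset = (Finset.Icc 1 (N / 2)).filter (fun d => d ∣ N) := by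
    ext d
    rw [List.mem_toFinset, hmemA, Finset.mem_filter, Finset.mem_Icc]
    constructor
    · rintro ⟨h1, h2, h3⟩
      exact ⟨⟨h1, (Int.le_ediv_iff_mul_le (by omega : (0:Int) < 2)).mpr (by omega)⟩, h3⟩
    · rintro ⟨⟨h1, h2⟩, h3⟩
      have := (Int.le_ediv_iff_mul_le (by omega : (0:Int) < 2)).mp h2
      exact ⟨h1, by omega, h3⟩
  have hsumA : lA.sum = lA.toFinset.sum id := by
    rw [List.sum_toFinset _ ndA, List.map_id]
  rw [hsumA, hfin]

theorem pv_main (limit : Int) : divisor_sum_list limit = divisor_sum_list_alt limit := by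
  unfold divisor_sum_list divisor_sum_list_alt
  have hlenA : ((PySem.List.pyRange 1 (PySem.Int.truncdiv limit 2 + 1) 1).foldl
      (fun xs i => pvInner i limit xs (2 * i)) (List.replicate limit.toNat 0)).length
      = limit.toNat := by
    rw [pvOuter_length, List.length_replicate]
  have hlenBpre : (((List.replicate limit.toNat (0 : Int)).length : Int)) = ↑limit.toNat := by
    rw [List.length_replicate]
  by_cases hpos : 0 < limit
  case neg =>
    -- limit ≤ 0: both sides are the empty list
    have hA : PySem.List.pyRange 1 (PySem.Int.truncdiv limit 2 + 1) 1 = [] := by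
      apply PySem.List.pyRange_one_eq_nil
      have : PySem.Int.truncdiv limit 2 ≤ 0 := by
        show Int.tdiv limit 2 ≤ 0
        have h2 : Int.tdiv (-limit) 2 = -(Int.tdiv limit 2) := Int.neg_tdiv limit 2
        have h1 : Int.tdiv (-limit) 2 = (-limit) / 2 := Int.tdiv_eq_ediv_of_nonneg (by omega)
        omega
      omega
    have hB : ¬ (1 * 1 < limit) := by omega
    rw [hA]
    rw [show pvPairLoop limit (List.replicate limit.toNat 0) 1
        = List.replicate limit.toNat 0 by rw [pvPairLoop]; exact dif_neg hB]
    rfl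
  case pos =>
  have hlenr : ((List.replicate limit.toNat (0 : Int)).length : Int) = limit := by
    rw [List.length_replicate]; omega
  have hlenB : (pvPairLoop limit (List.replicate limit.toNat 0) 1).length = limit.toNat := by
    have : ∀ (xs : List Int) (d : Int), (pvPairLoop limit xs d).length = xs.length := by
      intro xs d
      fun_induction pvPairLoop with
      | case1 xs d h ih =>
          simp only [dite_eq_ite] at ih ⊢
          rw [ih, pvFoldSet_length]
          by_cases h1 : 1 < d
          · rw [if_pos h1, PySem.List.length_pySetD]
          · rw [if_neg h1]
      | case2 xs d h => rfl
    rw [this, List.length_replicate]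
  apply List.ext_getElem (by rw [hlenA, hlenB])
  intro n h1 h2
  have hnlim : (n : Int) < limit := by rw [hlenA] at h1; omega
  have hrep : (List.replicate limit.toNat (0 : Int)).getD n 0 = 0 := by
    rw [List.getD_eq_getElem _ 0 (by rw [List.length_replicate]; omega)]
    simp
  have hA : ((PySem.List.pyRange 1 (PySem.Int.truncdiv limit 2 + 1) 1).foldl
      (fun xs i => pvInner i limit xs (2 * i)) (List.replicate limit.toNat 0))[n] =
      ((PySem.List.pyRange 1 (PySem.Int.truncdiv limit 2 + 1) 1).foldl
      (fun xs i => pvInner i limit xs (2 * i)) (List.replicate limit.toNat 0)).getD n 0 :=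
    (List.getD_eq_getElem _ 0 h1).symm
  have hB : (pvPairLoop limit (List.replicate limit.toNat 0) 1)[n] =
      (pvPairLoop limit (List.replicate limit.toNat 0) 1).getD n 0 :=
    (List.getD_eq_getElem _ 0 h2).symm
  rw [hA, hB]
  rw [pvOuter_getD limit _ _ (fun i hi => by
        have := (PySem.List.mem_pyRange_one).mp hi
        omega) hlenr n]
  rw [pvPairLoop_getD limit _ 1 n (by omega) hlenr]
  rw [hrep, zero_add, zero_add]
  rw [pvIndexA_eq limit n hnlim]
  exact (pvPairing limit (n : Int) (by positivity) hnlim).symm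

-- ===== VERDICT (by name: the statement is the Claim_ definition above) =====
theorem divisor_sum_list_spec : Claim_equal_divisor_sum_list := by
  intro limit _
  unfold Spec_divisor_sum_list
  exact pv_main limit
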